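-- pv_equiv track=rewrite | github.com/markbroich/coding_challenges_example_solutions | coding_challenges_example_solutions/ranking_by_vote/ranking_by_vote.py | rank_by_votes
-- ===== SOURCE A (Python) =====
-- import functools
--
-- def rank_by_votes(votes):
--     # Ot(v * w) Os(m * m)
--     rank_count_dict = pop_dict(votes)
--
--     # Ot(kmlogm), Os(m)
--     # m is number of teams and k is up to the number of sorting criteria.
--     # In some cases k may be small if a tie can be broken early
--     def comp(a, b):
--         for r in rank_count_dict[a]:
--             if (rank_count_dict[a][r] < rank_count_dict[b][r]):
--                 return 1
--             elif (rank_count_dict[a][r] > rank_count_dict[b][r]):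
--                 return -1
--         if a > b:
--             return 1
--         return -1
--     res = sorted(rank_count_dict, key=functools.cmp_to_key(comp))
--
--     # O(m)
--     return ''.join(res)
--
-- def pop_dict(votes):
--     teamset = set()
--     rank_count_dict = {}
--     for v in votes:
--         for t in v:
--             teamset.add(t)
--     ranks = len(teamset)
--     for v in votes:
--         for i, t in enumerate(v):
--             if t not in rank_count_dict:
--                 rank_count_dict[t] = {r: 0 for r in range(ranks)}
--                 rank_count_dict[t][i] = 1
--             else:
--                 rank_count_dict[t][i] += 1
--     return rank_count_dict
-- ===== SOURCE B (Python) =====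
-- def rank_by_votes(votes):
--     teams = sorted({t for v in votes for t in v})
--     n = len(teams)
--     def key(t):
--         return [-sum(1 for v in votes if r < len(v) and v[r] == t) for r in range(n)] + [ord(t)]
--     return ''.join(sorted(teams, key=key))
-- ===== Notes on version B (the rewrite author's own statement) =====
-- stated objective: idiomatic
-- what changed: Replaces A's incremental nested dict of per-team rank counters and its cmp_to_key rank-scanning comparator by a direct per-(team,rank) count over the votes and one precomputed lexicographic sort key (negated counts plus the team's code point) for a single key-based sort.
-- outside the precondition, e.g. on rank_by_votes(['aa']): A raises KeyError, B returns 'a'; on rank_by_votes(['aab']): A returns 'ab', B returns 'ab'; on rank_by_votes(['cdcdb', 'cdcdb', 'cdcda']): A returns 'cdba', B returns 'cdab'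
import Mathlib
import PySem

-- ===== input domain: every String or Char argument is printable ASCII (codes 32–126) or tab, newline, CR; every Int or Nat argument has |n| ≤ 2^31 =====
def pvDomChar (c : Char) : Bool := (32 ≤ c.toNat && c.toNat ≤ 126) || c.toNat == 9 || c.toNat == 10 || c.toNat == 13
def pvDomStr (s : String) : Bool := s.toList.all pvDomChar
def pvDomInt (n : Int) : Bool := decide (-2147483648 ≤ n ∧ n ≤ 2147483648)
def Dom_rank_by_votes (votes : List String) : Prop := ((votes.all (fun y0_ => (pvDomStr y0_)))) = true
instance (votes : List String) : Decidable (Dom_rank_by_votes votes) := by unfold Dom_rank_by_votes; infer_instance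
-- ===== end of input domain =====

-- B replaces A's incremental nested dict of rank counters and its cmp_to_key comparator by direct
-- per-(team,rank) counting and one precomputed lexicographic sort key (objective: idiomatic, not faster).

-- ===== PORT A =====
-- {r: 0 for r in range(ranks)}
def pvFreshRow (ranks : Nat) : PySem.Dict Int Int :=
  (PySem.List.pyRange 0 (ranks : Int) 1).foldl (fun m r => m.insert r 0) PySem.Dict.empty

-- pop_dict(votes); 'rank_count_dict[t][i] += 1' raises KeyError when i is not a key of the inner
-- dict (outside Pre_): ported totally via getD there, exact wherever Python returns.
def pvPopDict (votes : List String) : PySem.Dict Char (PySem.Dict Int Int) :=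
  let teamset : PySem.Set Char :=
    votes.foldl (fun s v => v.toList.foldl (fun s t => PySem.Set.add s t) s) PySem.Set.empty
  let ranks : Nat := teamset.length
  votes.foldl (fun d v =>
    (PySem.List.enumerate v.toList).foldl (fun d it =>
      d.insert it.2
        (if d.contains it.2 then
          (d.getD it.2 PySem.Dict.empty).insert it.1 ((d.getD it.2 PySem.Dict.empty).getD it.1 0 + 1)
        else
          (pvFreshRow ranks).insert it.1 1)) d) PySem.Dict.empty

-- the 'for r in rank_count_dict[a]' loop of comp, over the key list of a's inner dict
def pvCompLoop (da db : PySem.Dict Int Int) (keys : List Int) (a b : Char) : Int :=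
  match keys with
  | [] => if b < a then 1 else -1
  | r :: rest =>
    if da.getD r 0 < db.getD r 0 then 1
    else if db.getD r 0 < da.getD r 0 then -1
    else pvCompLoop da db rest a b

-- comp(a, b); 'rank_count_dict[b][r]' raises KeyError when r is missing (outside Pre_): getD there
def pvComp (d : PySem.Dict Char (PySem.Dict Int Int)) (a b : Char) : Int :=
  pvCompLoop (d.getD a PySem.Dict.empty) (d.getD b PySem.Dict.empty)
    (d.getD a PySem.Dict.empty).keys a b

-- sorted(rank_count_dict, key=functools.cmp_to_key(comp)): Python's stable sort under a comparator,
-- ported as stable insertion ordering by 'comp(x, y) < 0' — exact whenever the comparator is a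
-- strict total order on the sorted elements, which holds on Pre_ (distinct teams, total tie-break).
def rank_by_votes (votes : List String) : String :=
  let d := pvPopDict votes
  let res := d.keys.foldl (fun acc t => PySem.List.insertBy (fun x y => decide (pvComp d x y < 0)) t acc) []
  String.mk res

-- ===== PORT B =====
-- key(t) = [-sum(1 for v in votes if r < len(v) and v[r] == t) for r in range(n)] + [ord(t)]
-- ('r < len(v) and v[r] == t' is exactly v[r] == t without IndexError, r ≥ 0: pyGet? = some t)
def pvKey (votes : List String) (n : Nat) (t : Char) : List Int :=
  (PySem.List.pyRange 0 (n : Int) 1).map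
      (fun r => -((votes.countP (fun v => PySem.List.pyGet? v.toList r == some t) : Int)))
    ++ [(t.toNat : Int)]

def rank_by_votes_alt (votes : List String) : String :=
  let teams : List Char :=
    PySem.List.sorted (PySem.Set.ofList (votes.flatMap (fun v => v.toList))) (fun x => x) false
  String.mk (PySem.List.sorted teams (pvKey votes teams.length) false)

-- ===== PRECONDITION & SPEC =====
-- Pre_ excludes votes longer than the number of distinct teams (possible only with repeated team
-- names in one vote): there A raises KeyError on most inputs (e.g. ['aa']) and, where it happens
-- to return, its order can depend on leftover rank keys ≥ the team count, which B (ranks 0..m-1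
-- only) deliberately ignores.
def Pre_rank_by_votes (votes : List String) : Prop :=
  ∀ v ∈ votes, v.toList.length ≤ (PySem.Set.ofList (votes.flatMap (fun v => v.toList))).length
instance (votes : List String) : Decidable (Pre_rank_by_votes votes) := by
  unfold Pre_rank_by_votes; infer_instance
def pvWitness_rank_by_votes : List String := ["ab", "ba"]
def Spec_rank_by_votes (votes : List String) (out : String) : Prop := out = rank_by_votes_alt votes
instance (votes : List String) (out : String) : Decidable (Spec_rank_by_votes votes out) := by
  unfold Spec_rank_by_votes; infer_instance

-- ===== CLAIM (what is proved, stated in full; the proofs are below) =====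
def Claim_equal_rank_by_votes : Prop := ∀ (votes : List String), Dom_rank_by_votes votes → Pre_rank_by_votes votes → Spec_rank_by_votes votes (rank_by_votes votes)

-- ===== LEMMAS AND PROOFS =====

def pvFlat (votes : List String) : List Char := votes.flatMap (fun v => v.toList)
def pvPairs (votes : List String) : List (Int × Char) :=
  votes.flatMap (fun v => PySem.List.enumerate v.toList)
def pvStep (ranks : Nat) (d : PySem.Dict Char (PySem.Dict Int Int)) (it : Int × Char) :
    PySem.Dict Char (PySem.Dict Int Int) :=
  d.insert it.2
    (if d.contains it.2 then
      (d.getD it.2 PySem.Dict.empty).insert it.1 ((d.getD it.2 PySem.Dict.empty).getD it.1 0 + 1)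
    else
      (pvFreshRow ranks).insert it.1 1)

theorem pv_teamset (votes : List String) :
    votes.foldl (fun s v => v.toList.foldl (fun s t => PySem.Set.add s t) s) PySem.Set.empty
      = PySem.Set.ofList (pvFlat votes) := by
  rw [PySem.Set.ofList_eq_foldl, pvFlat, List.flatMap_def, List.foldl_flatten, List.foldl_map]
  rfl

theorem pv_popDict_eq (votes : List String) :
    pvPopDict votes = (pvPairs votes).foldl (pvStep (PySem.Set.ofList (pvFlat votes)).length)
      PySem.Dict.empty := by
  rw [pvPopDict, pv_teamset, pvPairs, List.flatMap_def, List.foldl_flatten, List.foldl_map]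
  rfl

theorem pv_keys (votes : List String) :
    (pvPopDict votes).keys = PySem.Set.ofList (pvFlat votes) := by
  rw [pv_popDict_eq]
  have hmap : (pvPairs votes).map (fun (p : Int × Char) => p.2) = pvFlat votes := by
    rw [pvPairs, pvFlat, List.map_flatMap]
    congr 1; funext v; exact PySem.List.map_snd_enumerate v.toList 0
  have h := PySem.Dict.keys_foldl_insert_key (ν := PySem.Dict Int Int) (pvPairs votes)
      (fun (p : Int × Char) => p.2)
      (fun d it => if d.contains it.2 then
          (d.getD it.2 PySem.Dict.empty).insert it.1 ((d.getD it.2 PySem.Dict.empty).getD it.1 0 + 1)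
        else (pvFreshRow (PySem.Set.ofList (pvFlat votes)).length).insert it.1 1)
      PySem.Dict.empty
  rw [hmap, show (PySem.Dict.empty : PySem.Dict Char (PySem.Dict Int Int)).keys = [] from rfl,
    PySem.Set.update_nil_left] at h
  exact h

theorem pv_freshRow_getD (ranks : Nat) (r : Int) : (pvFreshRow ranks).getD r 0 = 0 := by
  rw [pvFreshRow]
  have : ∀ (l : List Int) (m : PySem.Dict Int Int), (∀ x, m.getD x 0 = 0) →
      ∀ x, (l.foldl (fun m r => m.insert r 0) m).getD x 0 = 0 := by
    intro l
    induction l with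
    | nil => intro m hm x; exact hm x
    | cons y l ih =>
      intro m hm x
      rw [List.foldl_cons]
      refine ih _ ?_ x
      intro z
      rw [PySem.Dict.getD_insert]
      split <;> simp [hm]
  exact this _ _ (by intro x; simp [pysem]) r

theorem pv_freshRow_keys (ranks : Nat) :
    (pvFreshRow ranks).keys = PySem.List.pyRange 0 (ranks : Int) 1 := by
  rw [pvFreshRow]
  show (List.foldl (fun m r => m.insert r ((fun (_ : PySem.Dict Int Int) (_ : Int) => (0:Int)) m r)) PySem.Dict.empty _).keys = _
  rw [PySem.Dict.keys_foldl_insert]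
  rw [show (PySem.Dict.empty : PySem.Dict Int Int).keys = [] from rfl, PySem.Set.update_nil_left]
  apply PySem.Set.ofList_eq_self_of_nodup
  rw [PySem.List.pyRange_zero_natCast]
  exact (List.nodup_range).map (fun a b h => by exact_mod_cast h)

def pvInv (ranks : Nat) (d : PySem.Dict Char (PySem.Dict Int Int)) (pre : List (Int × Char)) : Prop :=
  d.keys = PySem.Set.ofList (pre.map (fun p => p.2)) ∧
  ∀ t ∈ d.keys, (d.getD t PySem.Dict.empty).keys = PySem.List.pyRange 0 (ranks : Int) 1 ∧
    ∀ r : Int, (d.getD t PySem.Dict.empty).getD r 0 = (pre.count (r, t) : Int)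

theorem pv_count_zero_of_not_mem (pre : List (Int × Char)) (t : Char)
    (h : t ∉ pre.map (fun p => p.2)) (r : Int) : pre.count (r, t) = 0 := by
  rw [List.count_eq_zero]
  intro hmem
  exact h (List.mem_map_of_mem hmem)

theorem pv_inv_step (ranks : Nat) (d : PySem.Dict Char (PySem.Dict Int Int))
    (pre : List (Int × Char)) (p : Int × Char) (hp : 0 ≤ p.1 ∧ p.1 < (ranks : Int))
    (h : pvInv ranks d pre) : pvInv ranks (pvStep ranks d p) (pre ++ [p]) := by
  obtain ⟨hkeys, hin⟩ := h
  obtain ⟨i, t⟩ := p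
  simp only at hp
  constructor
  · -- keys
    have : ((pre ++ [(i, t)]).map (fun p => p.2)) = pre.map (fun p => p.2) ++ [t] := by simp
    rw [this, pvStep, PySem.Set.ofList_eq_foldl, List.foldl_append, ← PySem.Set.ofList_eq_foldl]
    rw [← hkeys]
    show (d.insert t _).keys = PySem.Set.add d.keys t
    by_cases hc : d.contains t = true
    · rw [PySem.Dict.keys_insert_of_contains _ _ hc, PySem.Set.add]
      have : PySem.Set.contains d.keys t = true := by
        simpa [PySem.Set.contains] using (PySem.Dict.contains_iff_mem_keys _ _).mp hc
      simp
      exact (PySem.Dict.contains_iff_mem_keys _ _).mp hc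
    · rw [PySem.Dict.keys_insert_of_not_contains _ _ (by simpa using hc), PySem.Set.add]
      have : t ∉ d.keys := fun hm => hc ((PySem.Dict.contains_iff_mem_keys _ _).mpr hm)
      have hcf : PySem.Set.contains d.keys t = false := by
        simpa [PySem.Set.contains] using this
      simp
      exact this
  · -- per-team facts
    intro t' ht'
    have hstep : (pvStep ranks d (i, t)).getD t' PySem.Dict.empty =
        if t' = t then (if d.contains t then
          (d.getD t PySem.Dict.empty).insert i ((d.getD t PySem.Dict.empty).getD i 0 + 1)
        else (pvFreshRow ranks).insert i 1) else d.getD t' PySem.Dict.empty := by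
      rw [pvStep, PySem.Dict.getD_insert]
    by_cases hct : t' = t
    · subst hct
      by_cases hc : d.contains t' = true
      · have hmem : t' ∈ d.keys := (PySem.Dict.contains_iff_mem_keys _ _).mp hc
        obtain ⟨hk, hcnt⟩ := hin t' hmem
        have hci : (d.getD t' PySem.Dict.empty).contains i = true := by
          rw [PySem.Dict.contains_iff_mem_keys, hk, PySem.List.mem_pyRange_one]
          exact hp
        rw [hstep, if_pos rfl, if_pos hc]
        constructor
        · rw [PySem.Dict.keys_insert_of_contains _ _ hci, hk]
        · intro r
          rw [PySem.Dict.getD_insert, List.count_append, hcnt]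
          by_cases hri : r = i
          · subst hri
            simp
          · have : ¬ ((i, t') = (r, t')) := by
              intro h; exact hri (by cases h; rfl)
            simp [hri, this, hcnt]
      · have hnm : t' ∉ d.keys := fun hm => hc ((PySem.Dict.contains_iff_mem_keys _ _).mpr hm)
        have hcnt0 : ∀ r : Int, pre.count (r, t') = 0 := by
          intro r
          refine pv_count_zero_of_not_mem pre t' ?_ r
          intro hmm
          exact hnm (by rw [hkeys]; exact (PySem.Set.mem_ofList _ _).mpr hmm)
        have hci : (pvFreshRow ranks).contains i = true := by
          rw [PySem.Dict.contains_iff_mem_keys, pv_freshRow_keys, PySem.List.mem_pyRange_one]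
          exact hp
        rw [hstep, if_pos rfl, if_neg hc]
        constructor
        · rw [PySem.Dict.keys_insert_of_contains _ _ hci, pv_freshRow_keys]
        · intro r
          rw [PySem.Dict.getD_insert, List.count_append]
          by_cases hri : r = i
          · subst hri
            simp [hcnt0]
          · have : ¬ ((i, t') = (r, t')) := by
              intro h; exact hri (by cases h; rfl)
            simp [hri, this, hcnt0, pv_freshRow_getD]
    · -- t' ≠ t : entry unchanged
      have hmem : t' ∈ d.keys := by
        have h := ht'
        simp only [pvStep] at h
        by_cases hc : d.contains t = true
        · rwa [PySem.Dict.keys_insert_of_contains _ _ hc] at h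
        · rw [PySem.Dict.keys_insert_of_not_contains _ _ (by simpa using hc)] at h
          rcases List.mem_append.mp h with h | h
          · exact h
          · exact absurd (List.mem_singleton.mp h) hct
      obtain ⟨hk, hcnt⟩ := hin t' hmem
      rw [hstep, if_neg hct]
      refine ⟨hk, ?_⟩
      intro r
      have : ¬ ((i, t) = (r, t')) := by
        intro h; cases h; exact hct rfl
      rw [List.count_append, hcnt]
      simp [this]

theorem pv_inv_foldl (ranks : Nat) (ps : List (Int × Char)) :
    ∀ (pre : List (Int × Char)) (d : PySem.Dict Char (PySem.Dict Int Int)),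
    (∀ p ∈ ps, 0 ≤ p.1 ∧ p.1 < (ranks : Int)) → pvInv ranks d pre →
    pvInv ranks (ps.foldl (pvStep ranks) d) (pre ++ ps) := by
  induction ps with
  | nil => intro pre d _ h; simpa using h
  | cons p ps ih =>
    intro pre d hps h
    rw [List.foldl_cons, show pre ++ p :: ps = (pre ++ [p]) ++ ps by simp]
    exact ih (pre ++ [p]) _ (fun q hq => hps q (List.mem_cons_of_mem _ hq))
      (pv_inv_step ranks d pre p (hps p List.mem_cons_self) h)

theorem pv_pairs_bound (votes : List String) (hpre : Pre_rank_by_votes votes) :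
    ∀ p ∈ pvPairs votes, 0 ≤ p.1 ∧ p.1 < ((PySem.Set.ofList (pvFlat votes)).length : Int) := by
  intro p hp
  rw [pvPairs, List.mem_flatMap] at hp
  obtain ⟨v, hv, hpv⟩ := hp
  rw [PySem.List.mem_enumerate_iff] at hpv
  obtain ⟨k, hk, rfl⟩ := hpv
  refine ⟨by simp, ?_⟩
  have := hpre v hv
  rw [show votes.flatMap (fun v => v.toList) = pvFlat votes from rfl] at this
  simp only []
  omega

theorem pv_dict_inv (votes : List String) (hpre : Pre_rank_by_votes votes) :
    pvInv (PySem.Set.ofList (pvFlat votes)).length (pvPopDict votes) (pvPairs votes) := by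
  rw [pv_popDict_eq]
  have h := pv_inv_foldl (PySem.Set.ofList (pvFlat votes)).length (pvPairs votes) []
    PySem.Dict.empty (pv_pairs_bound votes hpre) ?_
  · simpa using h
  · constructor
    · rfl
    · intro t ht
      simp [PySem.Dict.keys, PySem.Dict.empty] at ht

theorem pv_fst_ge_of_mem_enumerate (cs : List Char) (s : Int) (p : Int × Char)
    (h : p ∈ PySem.List.enumerate cs s) : s ≤ p.1 := by
  rw [PySem.List.mem_enumerate_iff] at h
  obtain ⟨k, hk, rfl⟩ := h
  simp

theorem pv_count_enumerate (cs : List Char) (s : Int) (r : Nat) (t : Char) :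
    (PySem.List.enumerate cs s).count (s + (r : Int), t)
      = if cs[r]? = some t then 1 else 0 := by
  induction cs generalizing s r with
  | nil => simp [PySem.List.enumerate]
  | cons c cs ih =>
    rw [PySem.List.enumerate_cons, List.count_cons]
    cases r with
    | zero =>
      have h0 : (PySem.List.enumerate cs (s + 1)).count (s + (0:Nat), t) = 0 := by
        rw [List.count_eq_zero]
        intro hm
        have := pv_fst_ge_of_mem_enumerate cs (s + 1) _ hm
        simp at this
      rw [h0]
      by_cases hct : c = t
      · subst hct; simp
      · simp [hct]
    | succ r =>
      have hidx : (s + ((r:Nat) + 1 : Nat) : Int) = (s + 1) + (r : Nat) := by push_cast; ring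
      rw [hidx, ih (s+1) r]
      have hne : (((s, c) : Int × Char) ≠ (((s + 1) + ((r:Nat) : Int) : Int), t)) := by
        intro h
        have := congrArg Prod.fst h
        simp at this
        omega
      simp [hne]

theorem pv_count_pairs (votes : List String) (r : Nat) (t : Char) :
    ((pvPairs votes).count ((r : Int), t) : Int)
      = (votes.countP (fun v => PySem.List.pyGet? v.toList (r : Int) == some t) : Int) := by
  congr 1
  rw [pvPairs, List.flatMap_def, List.count_flatten, List.map_map]
  induction votes with
  | nil => rfl
  | cons v votes ih =>
    rw [List.map_cons, List.sum_cons, List.countP_cons, ih]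
    have := pv_count_enumerate v.toList 0 r t
    rw [zero_add] at this
    simp only [Function.comp]
    rw [this, PySem.List.pyGet?_natCast]
    by_cases h : v.toList[r]? = some t
    · simp [h]; omega
    · simp [h]

theorem pv_char_eq_of_toNat_eq (a b : Char) (h : a.toNat = b.toNat) : a = b :=
  Char.ext (UInt32.toNat_inj.mp h)

theorem pv_char_lt_iff (a b : Char) : a < b ↔ (a.toNat : Int) < (b.toNat : Int) := by
  rw [Char.lt_def]
  constructor
  · intro h; exact_mod_cast UInt32.lt_iff_toNat_lt.mp h
  · intro h; exact UInt32.lt_iff_toNat_lt.mpr (by exact_mod_cast h)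

theorem pv_compLoop_lt_iff (da db : PySem.Dict Int Int) (rs : List Int) (a b : Char)
    (hab : a ≠ b) :
    (pvCompLoop da db rs a b < 0) ↔
      (rs.map (fun r => -(da.getD r 0)) ++ [(a.toNat : Int)])
        < (rs.map (fun r => -(db.getD r 0)) ++ [(b.toNat : Int)]) := by
  induction rs with
  | nil =>
    simp only [List.map_nil, List.nil_append, pvCompLoop]
    rw [List.cons_lt_cons_iff]
    have hne : (a.toNat : Int) ≠ (b.toNat : Int) := by
      intro h
      exact hab (pv_char_eq_of_toNat_eq a b (by exact_mod_cast h))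
    constructor
    · intro h
      split at h
      · omega
      · rename_i hba
        left
        rw [← pv_char_lt_iff]
        rcases lt_trichotomy a b with h' | h' | h'
        · exact h'
        · exact absurd h' hab
        · exact absurd h' hba
    · intro h
      rcases h with h | ⟨h, h2⟩
      · rw [← pv_char_lt_iff] at h
        rw [if_neg (by exact fun hba => absurd (lt_trans h hba) (lt_irrefl a))]
        omega
      · exact absurd h hne
  | cons r rs ih =>
    simp only [List.map_cons, List.cons_append, pvCompLoop]
    rw [List.cons_lt_cons_iff]
    rcases lt_trichotomy (da.getD r 0) (db.getD r 0) with h | h | h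
    · rw [if_pos h]
      constructor
      · omega
      · rintro (h2 | ⟨h2, _⟩) <;> omega
    · rw [if_neg (by omega), if_neg (by omega), ih]
      constructor
      · intro h2; right; exact ⟨by omega, h2⟩
      · rintro (h2 | ⟨_, h2⟩)
        · omega
        · exact h2
    · rw [if_neg (by omega), if_pos h]
      constructor
      · intro _; left; omega
      · intro _; omega

theorem pv_insertBy_congr {α : Type} (p q : α → α → Bool) (x : α) (ys : List α)
    (h : ∀ y ∈ ys, p x y = q x y) :
    PySem.List.insertBy p x ys = PySem.List.insertBy q x ys := by
  induction ys with
  | nil => rfl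
  | cons y ys ih =>
    show (if p x y = true then _ else _) = (if q x y = true then _ else _)
    rw [h y List.mem_cons_self]
    split
    · rfl
    · rw [ih (fun z hz => h z (List.mem_cons_of_mem _ hz))]

theorem pv_foldl_insertBy_congr {α : Type} (p q : α → α → Bool) (S : List α)
    (hpq : ∀ a ∈ S, ∀ b ∈ S, a ≠ b → p a b = q a b) :
    ∀ (xs acc : List α), xs.Nodup → (∀ x ∈ xs, x ∈ S) → (∀ y ∈ acc, y ∈ S) →
      (∀ x ∈ xs, x ∉ acc) →
    xs.foldl (fun acc x => PySem.List.insertBy p x acc) acc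
      = xs.foldl (fun acc x => PySem.List.insertBy q x acc) acc := by
  intro xs
  induction xs with
  | nil => intro acc _ _ _ _; rfl
  | cons x xs ih =>
    intro acc hnd hxs hacc hdisj
    rw [List.foldl_cons, List.foldl_cons]
    have hx : x ∈ S := hxs x List.mem_cons_self
    have hins : PySem.List.insertBy p x acc = PySem.List.insertBy q x acc := by
      refine pv_insertBy_congr p q x acc (fun y hy => ?_)
      exact hpq x hx y (hacc y hy) (fun hxy => (hdisj x List.mem_cons_self) (hxy ▸ hy))
    rw [hins]
    refine ih _ hnd.of_cons (fun z hz => hxs z (List.mem_cons_of_mem _ hz)) ?_ ?_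
    · intro y hy
      rcases (PySem.List.mem_insertBy (before := q) (x := x) (ys := acc) (y := y)).mp hy with h | h
      · exact h ▸ hx
      · exact hacc y h
    · intro z hz hzin
      rcases (PySem.List.mem_insertBy (before := q) (x := x) (ys := acc) (y := z)).mp hzin with h | h
      · exact (List.nodup_cons.mp hnd).1 (h ▸ hz)
      · exact hdisj z (List.mem_cons_of_mem _ hz) h

theorem pv_sorted_bridge (xs : List Char) (key : Char → List Int) :
    PySem.List.sorted xs key false
      = @PySem.List.sorted Char (List Int) List.instLinearOrder.toLT
          LinearOrder.toDecidableLT xs key false := by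
  rw [PySem.List.sorted_eq_foldl_insertBy,
    @PySem.List.sorted_eq_foldl_insertBy Char (List Int) List.instLinearOrder.toLT
      LinearOrder.toDecidableLT xs key]
  congr 1
  funext acc x
  congr 1
  funext a b
  exact decide_eq_decide.mpr List.lex_lt

theorem pv_key_eq (votes : List String) (hpre : Pre_rank_by_votes votes) (t : Char)
    (ht : t ∈ PySem.Set.ofList (pvFlat votes)) :
    pvKey votes (PySem.Set.ofList (pvFlat votes)).length t
      = (PySem.List.pyRange 0 ((PySem.Set.ofList (pvFlat votes)).length : Int) 1).map
          (fun r => -(((pvPopDict votes).getD t PySem.Dict.empty).getD r 0))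
        ++ [(t.toNat : Int)] := by
  obtain ⟨hkeys, hin⟩ := pv_dict_inv votes hpre
  have htk : t ∈ (pvPopDict votes).keys := by rw [pv_keys]; exact ht
  obtain ⟨_, hcnt⟩ := hin t htk
  rw [pvKey]
  congr 1
  refine List.map_congr_left (fun r hr => ?_)
  rw [PySem.List.mem_pyRange_one] at hr
  have hr0 : r = ((r.toNat : Nat) : Int) := by omega
  rw [hcnt r, hr0, pv_count_pairs votes r.toNat t]

theorem pv_key_injective (votes : List String) (n : Nat) :
    Function.Injective (pvKey votes n) := by
  intro a b h
  rw [pvKey, pvKey] at h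
  have := congrArg List.getLast? h
  rw [List.getLast?_concat, List.getLast?_concat] at this
  exact pv_char_eq_of_toNat_eq a b (by exact_mod_cast Option.some_injective _ this)

theorem pv_comp_decide (votes : List String) (hpre : Pre_rank_by_votes votes)
    (a b : Char) (ha : a ∈ PySem.Set.ofList (pvFlat votes))
    (hb : b ∈ PySem.Set.ofList (pvFlat votes)) (hab : a ≠ b) :
    decide (pvComp (pvPopDict votes) a b < 0)
      = decide (pvKey votes (PySem.Set.ofList (pvFlat votes)).length a
          < pvKey votes (PySem.Set.ofList (pvFlat votes)).length b) := by
  obtain ⟨hkeys, hin⟩ := pv_dict_inv votes hpre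
  have hak : a ∈ (pvPopDict votes).keys := by rw [pv_keys]; exact ha
  obtain ⟨hka, _⟩ := hin a hak
  apply decide_eq_decide.mpr
  rw [pvComp, hka, pv_key_eq votes hpre a ha, pv_key_eq votes hpre b hb]
  exact pv_compLoop_lt_iff _ _ _ a b hab

theorem pv_main (votes : List String) (hpre : Pre_rank_by_votes votes) :
    rank_by_votes votes = rank_by_votes_alt votes := by
  simp only [rank_by_votes, rank_by_votes_alt]
  congr 1
  rw [pv_keys, show (votes.flatMap (fun v => v.toList)) = pvFlat votes from rfl]
  set S := PySem.Set.ofList (pvFlat votes) with hS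
  set n := S.length with hn
  have hnodup : S.Nodup := PySem.Set.nodup_ofList _
  have h2 : S.foldl (fun acc t =>
        PySem.List.insertBy (fun x y => decide (pvComp (pvPopDict votes) x y < 0)) t acc) []
      = S.foldl (fun acc t =>
        PySem.List.insertBy (fun x y => decide (pvKey votes n x < pvKey votes n y)) t acc) [] := by
    refine pv_foldl_insertBy_congr _ _ S ?_ S [] hnodup (fun x hx => hx) (by simp) (by simp)
    intro x hx y hy hxy
    exact pv_comp_decide votes hpre x y hx hy hxy
  rw [h2, ← PySem.List.sorted_eq_foldl_insertBy S (pvKey votes n)]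
  have hlen : (PySem.List.sorted S (fun x => x) false).length = n := by
    rw [PySem.List.length_sorted]
  rw [hlen]
  rw [pv_sorted_bridge, pv_sorted_bridge]
  exact PySem.List.sorted_eq_sorted_of_perm S _ (pvKey votes n)
    (pv_key_injective votes n) (PySem.List.sorted_perm S (fun x => x) false).symm

-- ===== VERDICT (by name: the statement is the Claim_ definition above) =====
theorem rank_by_votes_spec : Claim_equal_rank_by_votes := by
  intro votes _ hpre
  show rank_by_votes votes = rank_by_votes_alt votes
  exact pv_main votes hpre
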